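-- pv_equiv track=rewrite | github.com/microsoft/verus-proof-synthesis | verusage/utils.py | compress_nl_assertion
-- ===== SOURCE A (Python) =====
-- def compress_nl_assertion(code: str) -> str:
--     """
--     Compress nonlinear arithmetic assertions into single lines.
--
--     Args:
--         code: Source code with nonlinear arithmetic assertions
--
--     Returns:
--         Code with compressed nonlinear assertions
--     """
--     lines = code.split("\n")
--     inside = False
--     tmp_line = ""
--     new_code = ""
--     for line in lines:
--         if not inside:
--             if line.strip().startswith("assert") and "by" in line and "nonlinear_arith" in line:
--                 inside = True
--                 tmp_line += line
--             else:
--                 new_code += line + "\n"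
--         else:
--             if "{}" in line:
--                 tmp_line += " " + line.strip() + "\n"
--                 inside = False
--                 new_code += tmp_line
--                 tmp_line = ""
--             else:
--                 tmp_line += " " + line.strip()
--     return new_code
-- ===== SOURCE B (Python) =====
-- def compress_nl_assertion(code: str) -> str:
--     """Compress nonlinear arithmetic assertions into single lines.
--
--     Boundary-search decomposition: instead of a per-line state machine, find
--     the next assertion-start line, copy everything before it verbatim in one
--     slice, find its closing "{}" line, join the whole block at once, and
--     recurse on the remaining lines.
--     """
--
--     def find(pred, lines):
--         for i, l in enumerate(lines):
--             if pred(l):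
--                 return i
--         return None
--
--     def is_start(l):
--         return l.strip().startswith("assert") and "by" in l and "nonlinear_arith" in l
--
--     def go(lines):
--         i = find(is_start, lines)
--         if i is None:
--             return "".join(l + "\n" for l in lines)
--         head = "".join(l + "\n" for l in lines[:i])
--         rest = lines[i + 1:]
--         j = find(lambda l: "{}" in l, rest)
--         if j is None:
--             return head  # unclosed block at end of input is dropped
--         block = lines[i] + "".join(" " + l.strip() for l in rest[:j + 1]) + "\n"
--         return head + block + go(rest[j + 1:])
--
--     return go(code.split("\n"))
-- ===== Notes on version B (the rewrite author's own statement) =====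
-- stated objective: alternative
-- what changed: Replaced A's per-line state machine (inside flag and tmp_line carried across every iteration) by a boundary-search decomposition: find the next assertion-start line, copy the preceding slice verbatim, find the line that closes the block, join the whole block in one step, and recurse on the remaining lines.
import Mathlib
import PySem

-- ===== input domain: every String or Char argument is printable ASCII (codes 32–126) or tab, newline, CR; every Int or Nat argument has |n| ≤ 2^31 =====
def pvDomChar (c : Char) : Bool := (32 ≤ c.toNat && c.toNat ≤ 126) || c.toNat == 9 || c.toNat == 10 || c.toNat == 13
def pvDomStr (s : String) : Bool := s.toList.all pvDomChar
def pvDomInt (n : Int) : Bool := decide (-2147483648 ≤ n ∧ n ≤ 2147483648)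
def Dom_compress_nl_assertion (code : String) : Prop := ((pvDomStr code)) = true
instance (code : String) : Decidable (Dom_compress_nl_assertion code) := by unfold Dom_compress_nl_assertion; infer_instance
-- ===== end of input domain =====

-- B replaces A's per-line inside-flag state machine by boundary search and slicing: find the
-- next assertion-start line, copy the preceding slice verbatim, find its closing "{}" line,
-- join the whole block at once and recurse on the tail; same return value (no speed claim).

-- ===== PORT A =====
-- the start-of-block test, verbatim the same condition in both Pythons
def pvStartCond (line : String) : Bool :=
  PySem.Str.startswith (PySem.Str.strip line) "assert"
    && PySem.Str.isIn "by" line && PySem.Str.isIn "nonlinear_arith" line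

def compress_nl_assertion (code : String) : String :=
  let lines := (PySem.Str.split? code "\n").getD []
  let r := lines.foldl (fun (st : Bool × String × String) line =>
    let inside := st.1
    let tmp_line := st.2.1
    let new_code := st.2.2
    if !inside then
      if pvStartCond line then
        (true, tmp_line ++ line, new_code)
      else
        (inside, tmp_line, new_code ++ line ++ "\n")
    else
      if PySem.Str.isIn "{}" line then
        (false, "", new_code ++ (tmp_line ++ " " ++ PySem.Str.strip line ++ "\n"))
      else
        (inside, tmp_line ++ " " ++ PySem.Str.strip line, new_code)) (false, "", "")
  r.2.2

-- ===== PORT B =====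
-- Source B's `find` helper: index of the first line satisfying pred, none if there is none
def pvFind (p : String → Bool) : List String → Option Nat
  | [] => none
  | l :: rest => if p l then some 0 else (pvFind p rest).map (· + 1)

-- Source B's "".join over a list of pieces
def pvConcat : List String → String
  | [] => ""
  | x :: xs => x ++ pvConcat xs

-- needed for pvGoB's termination
theorem pvFind_lt : ∀ (p : String → Bool) (ls : List String) (i : Nat),
    pvFind p ls = some i → i < ls.length := by
  intro p ls
  induction ls with
  | nil => intro i h; simp [pvFind] at h
  | cons l rest ih =>
    intro i h
    simp only [pvFind] at h
    split at h
    · cases h; simp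
    · cases hr : pvFind p rest with
      | none => rw [hr] at h; cases h
      | some k =>
        rw [hr] at h
        simp at h
        have := ih k hr
        simp; omega

-- Source B's `go`: boundary search + slices, recursing on the tail after each closed block
def pvGoB (lines : List String) : String :=
  match h : pvFind pvStartCond lines with
  | none => pvConcat (lines.map (· ++ "\n"))
  | some i =>
    let head := pvConcat ((lines.take i).map (· ++ "\n"))
    let rest := lines.drop (i + 1)
    match pvFind (fun l => PySem.Str.isIn "{}" l) rest with
    | none => head
    | some j =>
      let block := lines.getD i "" ++
        pvConcat ((rest.take (j + 1)).map (fun l => " " ++ PySem.Str.strip l)) ++ "\n"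
      head ++ block ++ pvGoB (rest.drop (j + 1))
termination_by lines.length
decreasing_by
  have hi := pvFind_lt _ _ _ h
  simp only [List.length_drop]
  omega

def compress_nl_assertion_alt (code : String) : String :=
  pvGoB ((PySem.Str.split? code "\n").getD [])

-- ===== PRECONDITION & SPEC =====
def Spec_compress_nl_assertion (code : String) (out : String) : Prop := out = compress_nl_assertion_alt code
instance (code : String) (out : String) : Decidable (Spec_compress_nl_assertion code out) := by unfold Spec_compress_nl_assertion; infer_instance

-- ===== CLAIM (what is proved, stated in full; the proofs are below) =====
def Claim_equal_compress_nl_assertion : Prop := ∀ (code : String), Dom_compress_nl_assertion code → Spec_compress_nl_assertion code (compress_nl_assertion code)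

-- ===== LEMMAS AND PROOFS =====

-- non-dependent unfolding of pvGoB (its definition matches with `h :` for termination only)
theorem pvGoB_unfold (lines : List String) : pvGoB lines =
    match pvFind pvStartCond lines with
    | none => pvConcat (lines.map (· ++ "\n"))
    | some i =>
      match pvFind (fun l => PySem.Str.isIn "{}" l) (lines.drop (i + 1)) with
      | none => pvConcat ((lines.take i).map (· ++ "\n"))
      | some j =>
        pvConcat ((lines.take i).map (· ++ "\n")) ++
          (lines.getD i "" ++
            pvConcat (((lines.drop (i + 1)).take (j + 1)).map (fun l => " " ++ PySem.Str.strip l)) ++ "\n") ++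
          pvGoB ((lines.drop (i + 1)).drop (j + 1)) := by
  rw [pvGoB.eq_def]
  split
  · rename_i h; rw [h]
  · rename_i i h; rw [h]

-- proof-side recursive characterization of A's fold (the bridge between the two ports)
def pvScanClose : List String → Option (String × List String)
  | [] => none
  | l :: rest =>
    if PySem.Str.isIn "{}" l then some (" " ++ PySem.Str.strip l ++ "\n", rest)
    else match pvScanClose rest with
      | none => none
      | some (s, rem) => some (" " ++ PySem.Str.strip l ++ s, rem)

theorem pvScanClose_len : ∀ (ls : List String) (s : String) (rem : List String),
    pvScanClose ls = some (s, rem) → rem.length < ls.length := by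
  intro ls
  induction ls with
  | nil => intro s rem h; simp [pvScanClose] at h
  | cons l rest ih =>
    intro s rem h
    simp only [pvScanClose] at h
    split at h
    · cases h; simp
    · cases hrec : pvScanClose rest with
      | none => rw [hrec] at h; cases h
      | some p =>
        rw [hrec] at h
        cases h
        have := ih p.1 p.2 hrec
        simp at this ⊢
        omega

def pvGo : List String → String
  | [] => ""
  | l :: rest =>
    if pvStartCond l then
      match h : pvScanClose rest with
      | none => ""
      | some (s, rem) => l ++ s ++ pvGo rem
    else l ++ "\n" ++ pvGo rest
termination_by ls => ls.length
decreasing_by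
  · have := pvScanClose_len rest s rem h; simp; omega
  · simp

-- non-dependent unfolding of pvGo at a cons
theorem pvGo_cons (l : String) (rest : List String) : pvGo (l :: rest) =
    if pvStartCond l then
      match pvScanClose rest with
      | none => ""
      | some (s, rem) => l ++ s ++ pvGo rem
    else l ++ "\n" ++ pvGo rest := by
  rw [pvGo.eq_def]
  by_cases hs : pvStartCond l
  · simp only [hs, if_true]
    split
    · rename_i h; rw [h]
    · rename_i s rem h; rw [h]
  · simp only [hs, if_false, Bool.false_eq_true]

-- the loop body of port A, named for the proofs
def pvStepA (st : Bool × String × String) (line : String) : Bool × String × String :=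
  if !st.1 then
    if pvStartCond line then (true, st.2.1 ++ line, st.2.2)
    else (st.1, st.2.1, st.2.2 ++ line ++ "\n")
  else
    if PySem.Str.isIn "{}" line then (false, "", st.2.2 ++ (st.2.1 ++ " " ++ PySem.Str.strip line ++ "\n"))
    else (st.1, st.2.1 ++ " " ++ PySem.Str.strip line, st.2.2)

theorem pvStepA_false_start {l : String} (tmp nc : String) (hs : pvStartCond l = true) :
    pvStepA (false, tmp, nc) l = (true, tmp ++ l, nc) := by simp [pvStepA, hs]

theorem pvStepA_false_other {l : String} (tmp nc : String) (hs : pvStartCond l = false) :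
    pvStepA (false, tmp, nc) l = (false, tmp, nc ++ l ++ "\n") := by simp [pvStepA, hs]

theorem pvStepA_true_close {l : String} (tmp nc : String) (hc : PySem.Str.isIn "{}" l = true) :
    pvStepA (true, tmp, nc) l = (false, "", nc ++ (tmp ++ " " ++ PySem.Str.strip l ++ "\n")) := by
  simp only [PySem.Str.isIn_eq, show "{}".toList = ['{', '}'] from rfl] at hc; simp [pvStepA, hc]

theorem pvStepA_true_cont {l : String} (tmp nc : String) (hc : PySem.Str.isIn "{}" l = false) :
    pvStepA (true, tmp, nc) l = (true, tmp ++ " " ++ PySem.Str.strip l, nc) := by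
  simp only [PySem.Str.isIn_eq, show "{}".toList = ['{', '}'] from rfl] at hc; simp [pvStepA, hc]

theorem pvFold_eq : ∀ (n : ℕ) (ls : List String), ls.length ≤ n →
    (∀ nc : String, (ls.foldl pvStepA (false, "", nc)).2.2 = nc ++ pvGo ls) ∧
    (∀ tmp nc : String, (ls.foldl pvStepA (true, tmp, nc)).2.2 =
      nc ++ (match pvScanClose ls with
             | none => ""
             | some (s, rem) => tmp ++ s ++ pvGo rem)) := by
  intro n
  induction n with
  | zero =>
    intro ls h
    have : ls = [] := List.length_eq_zero_iff.mp (Nat.le_zero.mp h)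
    subst this
    exact ⟨fun nc => by simp [pvGo], fun tmp nc => by simp [pvScanClose]⟩
  | succ m ih =>
    intro ls h
    cases ls with
    | nil => exact ⟨fun nc => by simp [pvGo], fun tmp nc => by simp [pvScanClose]⟩
    | cons l rest =>
      have hrest : rest.length ≤ m := by simp at h; omega
      constructor
      · intro nc
        cases hs : pvStartCond l with
        | true =>
          rw [List.foldl_cons, pvStepA_false_start "" nc hs, (ih rest hrest).2 ("" ++ l) nc]
          cases hscan : pvScanClose rest with
          | none =>
            rw [pvGo_cons]
            simp only [hs, if_true, hscan]
          | some p =>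
            obtain ⟨s, rem⟩ := p
            rw [pvGo_cons]
            simp only [hs, if_true, hscan]
            rw [String.empty_append, ← String.append_assoc]
        | false =>
          rw [List.foldl_cons, pvStepA_false_other "" nc hs, (ih rest hrest).1 (nc ++ l ++ "\n")]
          rw [pvGo_cons]
          simp [hs, String.append_assoc]
      · intro tmp nc
        cases hc : PySem.Str.isIn "{}" l with
        | true =>
          rw [List.foldl_cons, pvStepA_true_close tmp nc hc, (ih rest hrest).1]
          simp only [pvScanClose]
          rw [hc]
          simp [String.append_assoc]
        | false =>
          rw [List.foldl_cons, pvStepA_true_cont tmp nc hc, (ih rest hrest).2]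
          simp only [pvScanClose]
          rw [hc]
          simp only [if_false, Bool.false_eq_true]
          cases hscan : pvScanClose rest with
          | none => simp
          | some p =>
            obtain ⟨s, rem⟩ := p
            simp [String.append_assoc]

-- A's anonymous foldl body is pvStepA
theorem pvFoldl_body_eq (ls : List String) (st : Bool × String × String) :
    ls.foldl (fun (st : Bool × String × String) line =>
      let inside := st.1
      let tmp_line := st.2.1
      let new_code := st.2.2
      if !inside then
        if pvStartCond line then (true, tmp_line ++ line, new_code)
        else (inside, tmp_line, new_code ++ line ++ "\n")
      else
        if PySem.Str.isIn "{}" line then (false, "", new_code ++ (tmp_line ++ " " ++ PySem.Str.strip line ++ "\n"))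
        else (inside, tmp_line ++ " " ++ PySem.Str.strip line, new_code)) st
    = ls.foldl pvStepA st := by
  induction ls generalizing st with
  | nil => rfl
  | cons l rest ih => simp only [List.foldl_cons, ih]; rfl

-- pvScanClose in terms of pvFind: close index j ↦ joined stripped slice plus the tail
theorem pvScanClose_eq_find : ∀ (ls : List String),
    pvScanClose ls = (pvFind (fun l => PySem.Str.isIn "{}" l) ls).map
      (fun j => (pvConcat ((ls.take (j + 1)).map (fun x => " " ++ PySem.Str.strip x)) ++ "\n",
                 ls.drop (j + 1))) := by
  intro ls
  induction ls with
  | nil => simp [pvScanClose, pvFind]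
  | cons l rest ih =>
    cases hc : PySem.Str.isIn "{}" l with
    | true =>
      simp only [pvScanClose, pvFind, hc, if_true, Option.map_some, List.take_succ_cons,
        List.take_zero, List.map_cons, List.map_nil, pvConcat, List.drop_succ_cons, List.drop_zero]
      simp [String.append_assoc]
    | false =>
      simp only [pvScanClose, pvFind, hc, if_false, Bool.false_eq_true, ih]
      cases hf : pvFind (fun l => PySem.Str.isIn "{}" l) rest with
      | none => simp
      | some j =>
        simp only [Option.map_some, List.take_succ_cons, List.map_cons, pvConcat,
          List.drop_succ_cons]
        simp [String.append_assoc]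

-- B's pvGoB skips a non-start line verbatim
theorem pvGoB_cons_not_start (l : String) (rest : List String) (hs : pvStartCond l = false) :
    pvGoB (l :: rest) = l ++ "\n" ++ pvGoB rest := by
  rw [pvGoB_unfold (l :: rest), pvGoB_unfold rest]
  have hcons : pvFind pvStartCond (l :: rest) = (pvFind pvStartCond rest).map (· + 1) := by
    simp [pvFind, hs]
  rw [hcons]
  cases hf : pvFind pvStartCond rest with
  | none => simp [pvConcat]
  | some i =>
    simp only [Option.map_some, List.drop_succ_cons, List.take_succ_cons, List.map_cons, pvConcat,
      List.getD_cons_succ]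
    cases hg : pvFind (fun l => PySem.Str.isIn "{}" l) (rest.drop (i + 1)) with
    | none => simp
    | some j => simp [String.append_assoc]

-- B's pvGoB on an empty list
theorem pvGoB_nil : pvGoB [] = "" := by
  rw [pvGoB_unfold]
  simp [pvFind, pvConcat]

-- the two ports' recursions agree
theorem pvGoB_eq_pvGo : ∀ (n : ℕ) (ls : List String), ls.length ≤ n → pvGoB ls = pvGo ls := by
  intro n
  induction n with
  | zero =>
    intro ls h
    have : ls = [] := List.length_eq_zero_iff.mp (Nat.le_zero.mp h)
    subst this
    rw [pvGoB_nil]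
    simp [pvGo]
  | succ m ih =>
    intro ls h
    cases ls with
    | nil => rw [pvGoB_nil]; simp [pvGo]
    | cons l rest =>
      have hrest : rest.length ≤ m := by simp at h; omega
      rw [pvGo_cons]
      cases hs : pvStartCond l with
      | false =>
        rw [pvGoB_cons_not_start l rest hs]
        simp only [if_false, Bool.false_eq_true, ih rest hrest]
      | true =>
        rw [pvGoB_unfold (l :: rest)]
        have hcons : pvFind pvStartCond (l :: rest) = some 0 := by simp [pvFind, hs]
        rw [hcons]
        simp only [if_true, List.drop_succ_cons, List.drop_zero, List.take_zero, List.map_nil,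
          pvConcat, List.getD_cons_zero]
        rw [pvScanClose_eq_find rest]
        cases hf : pvFind (fun l => PySem.Str.isIn "{}" l) rest with
        | none => simp
        | some j =>
          simp only [Option.map_some]
          have hlen : (rest.drop (j + 1)).length ≤ m := by
            simp only [List.length_drop]; omega
          rw [ih _ hlen]
          simp [String.append_assoc]

-- ===== VERDICT (by name: the statement is the Claim_ definition above) =====
theorem compress_nl_assertion_spec : Claim_equal_compress_nl_assertion := by
  intro code _
  dsimp only [Spec_compress_nl_assertion, compress_nl_assertion, compress_nl_assertion_alt]
  rw [pvFoldl_body_eq,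
    (pvFold_eq ((PySem.Str.split? code "\n").getD []).length _ le_rfl).1 "",
    String.empty_append]
  exact (pvGoB_eq_pvGo ((PySem.Str.split? code "\n").getD []).length _ le_rfl).symm
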